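-- pv_equiv track=rewrite | github.com/thevery-nvg/love_bot_aiogram | src/keyboards/base.py | create_keyboard_layout
-- ===== SOURCE A (Python) =====
-- from typing import Sequence, TypeVar, Type
--
-- T = TypeVar("T")
--
-- def create_keyboard_layout(buttons: Sequence[T], count: Sequence[int]) -> list[list[T]]:
--     if sum(count) != len(buttons):
--         raise ValueError("Количество кнопок не совпадает со схемой")
--     temp_list: list[list[T]] = []
--     btn_number = 0
--     for a in count:
--         temp_list.append([])
--         for _ in range(a):
--             temp_list[-1].append(buttons[btn_number])
--             btn_number += 1
--     return temp_list
-- ===== SOURCE B (Python) =====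
-- from typing import Sequence, TypeVar
--
-- T = TypeVar("T")
--
-- def create_keyboard_layout(buttons: Sequence[T], count: Sequence[int]) -> list[list[T]]:
--     if sum(count) != len(buttons):
--         raise ValueError("Количество кнопок не совпадает со схемой")
--     # precompute cumulative boundary offsets, then slice once per row
--     bounds: list[int] = []
--     total = 0
--     for c in count:
--         total += c
--         bounds.append(total)
--     return [list(buttons[s:e]) for s, e in zip([0] + bounds, bounds)]
-- ===== Notes on version B (the rewrite author's own statement) =====
-- stated objective: alternative
-- what changed: Replaces the per-element cursor that appends buttons one by one into the last row with a precomputed prefix-sum table of row boundaries and one slice per row.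
import Mathlib
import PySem

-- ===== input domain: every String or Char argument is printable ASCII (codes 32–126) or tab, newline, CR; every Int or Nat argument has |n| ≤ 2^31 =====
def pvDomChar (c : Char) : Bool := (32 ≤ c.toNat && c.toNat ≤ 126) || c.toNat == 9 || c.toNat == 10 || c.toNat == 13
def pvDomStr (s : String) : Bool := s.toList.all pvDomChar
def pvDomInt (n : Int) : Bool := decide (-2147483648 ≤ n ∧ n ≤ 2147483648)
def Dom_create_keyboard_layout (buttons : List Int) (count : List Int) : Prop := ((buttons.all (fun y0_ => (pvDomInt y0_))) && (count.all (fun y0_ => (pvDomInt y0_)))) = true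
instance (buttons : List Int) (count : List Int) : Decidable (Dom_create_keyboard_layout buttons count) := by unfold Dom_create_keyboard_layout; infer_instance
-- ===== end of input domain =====

-- B replaces A's per-element cursor (appending buttons one by one into the last row)
-- with a precomputed prefix-sum table of row boundaries and one slice per row.


-- ===== PORT A =====
-- Literal port of A: the ValueError guard returns [] (those inputs are outside Pre_);
-- for-loop over count, inner for _ in range(a) appending buttons[btn_number]
-- (pyGetD: out-of-range index = Python IndexError, also outside Pre_).
def create_keyboard_layout (buttons : List Int) (count : List Int) : List (List Int) :=
  if count.sum ≠ (buttons.length : Int) then []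
  else
    (count.foldl
      (fun (st : List (List Int) × Int) a =>
        let inner := (PySem.List.pyRange 0 a 1).foldl
          (fun (st2 : List Int × Int) _ =>
            (st2.1 ++ [PySem.List.pyGetD buttons st2.2 0], st2.2 + 1))
          ([], st.2)
        (st.1 ++ [inner.1], inner.2))
      ([], 0)).1

-- ===== PORT B =====
-- Port of B: same ValueError guard, then a prefix-sum fold building bounds, then one slice per boundary pair.
def create_keyboard_layout_alt (buttons : List Int) (count : List Int) : List (List Int) :=
  if count.sum ≠ (buttons.length : Int) then []
  else
    let bounds := (count.foldl (fun (st : List Int × Int) c => (st.1 ++ [st.2 + c], st.2 + c)) ([], 0)).1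
    (List.zip (0 :: bounds) bounds).map
      (fun se => PySem.List.slice buttons (some se.1) (some se.2))

-- ===== PRECONDITION & SPEC =====
-- Pre_ excludes only inputs where A raises: ValueError when sum(count) ≠ len(buttons),
-- and IndexError when some count is negative (the positive counts then overrun buttons).
def Pre_create_keyboard_layout (buttons : List Int) (count : List Int) : Prop :=
  count.sum = (buttons.length : Int) ∧ ∀ c ∈ count, 0 ≤ c
instance (buttons : List Int) (count : List Int) : Decidable (Pre_create_keyboard_layout buttons count) := by unfold Pre_create_keyboard_layout; infer_instance
def pvWitness_create_keyboard_layout : List Int × List Int := ([1, 2, 3], [1, 2])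

def Spec_create_keyboard_layout (buttons : List Int) (count : List Int) (out : List (List Int)) : Prop := out = create_keyboard_layout_alt buttons count
instance (buttons : List Int) (count : List Int) (out : List (List Int)) : Decidable (Spec_create_keyboard_layout buttons count out) := by unfold Spec_create_keyboard_layout; infer_instance

-- ===== CLAIM (what is proved, stated in full; the proofs are below) =====
def Claim_equal_create_keyboard_layout : Prop := ∀ (buttons : List Int) (count : List Int), Dom_create_keyboard_layout buttons count → Pre_create_keyboard_layout buttons count → Spec_create_keyboard_layout buttons count (create_keyboard_layout buttons count)

-- ===== LEMMAS AND PROOFS =====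

-- reference row at offset i of length n, as A's inner loop builds it
def rowF (buttons : List Int) (i : Int) : Nat → List Int
  | 0 => []
  | n + 1 => PySem.List.pyGetD buttons i 0 :: rowF buttons (i + 1) n

-- common reference shape: row i is buttons.drop t |>.take cᵢ at the prefix offset t
def specRows (buttons : List Int) (t : Nat) : List Int → List (List Int)
  | [] => []
  | c :: cs => ((buttons.drop t).take c.toNat) :: specRows buttons (t + c.toNat) cs

theorem sum_nonneg_of_mem {l : List Int} (h : ∀ c ∈ l, 0 ≤ c) : 0 ≤ l.sum := by
  induction l with
  | nil => simp
  | cons c cs ih =>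
    simp only [List.sum_cons]
    have := h c (by simp)
    have := ih (fun x hx => h x (List.mem_cons_of_mem _ hx))
    omega

theorem inner_fold_eq (buttons : List Int) (l : List Int) (row : List Int) (i : Int) :
    l.foldl (fun (st2 : List Int × Int) _ =>
        (st2.1 ++ [PySem.List.pyGetD buttons st2.2 0], st2.2 + 1)) (row, i)
    = (row ++ rowF buttons i l.length, i + l.length) := by
  induction l generalizing row i with
  | nil => simp [rowF]
  | cons x xs ih =>
    simp only [List.foldl_cons, ih, List.length_cons, rowF]
    simp only [Prod.mk.injEq, List.append_assoc, List.singleton_append]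
    exact ⟨trivial, by push_cast; ring⟩

theorem rowF_eq_take_drop (buttons : List Int) (t n : Nat) (h : t + n ≤ buttons.length) :
    rowF buttons (t : Int) n = (buttons.drop t).take n := by
  induction n generalizing t with
  | zero => simp [rowF]
  | succ m ih =>
    have ht : t < buttons.length := by omega
    rw [List.drop_eq_getElem_cons ht, List.take_succ_cons]
    simp only [rowF, List.cons.injEq]
    constructor
    · rw [PySem.List.pyGetD_natCast, List.getD_eq_getElem _ _ ht]
    · rw [show (t : Int) + 1 = ((t + 1 : Nat) : Int) by push_cast; ring]
      exact ih (t + 1) (by omega)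

theorem A_fold_eq (buttons : List Int) (count : List Int) (acc : List (List Int)) (t : Nat)
    (hnn : ∀ c ∈ count, 0 ≤ c) (hle : (t : Int) + count.sum ≤ (buttons.length : Int)) :
    (count.foldl
      (fun (st : List (List Int) × Int) a =>
        let inner := (PySem.List.pyRange 0 a 1).foldl
          (fun (st2 : List Int × Int) _ =>
            (st2.1 ++ [PySem.List.pyGetD buttons st2.2 0], st2.2 + 1))
          ([], st.2)
        (st.1 ++ [inner.1], inner.2))
      (acc, (t : Int))).1 = acc ++ specRows buttons t count := by
  induction count generalizing acc t with
  | nil => simp [specRows]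
  | cons c cs ih =>
    have hc : 0 ≤ c := hnn c (by simp)
    have hrest : 0 ≤ cs.sum := sum_nonneg_of_mem (fun x hx => hnn x (List.mem_cons_of_mem _ hx))
    simp only [List.sum_cons] at hle
    have hb : t + c.toNat ≤ buttons.length := by omega
    simp only [List.foldl_cons]
    rw [inner_fold_eq]
    have hlen : (PySem.List.pyRange 0 c 1).length = c.toNat := by
      rw [show c = (c.toNat : Int) by omega, PySem.List.pyRange_zero_natCast]
      simp
      omega
    rw [hlen, List.nil_append, rowF_eq_take_drop buttons t c.toNat hb]
    rw [show (t : Int) + (c.toNat : Int) = ((t + c.toNat : Nat) : Int) by push_cast; ring]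
    rw [ih _ (t + c.toNat) (fun x hx => hnn x (List.mem_cons_of_mem _ hx)) (by push_cast; omega)]
    simp [specRows]

-- explicit prefix-sum list matching B's bounds fold
def boundsF (t : Int) : List Int → List Int
  | [] => []
  | c :: cs => (t + c) :: boundsF (t + c) cs

theorem B_bounds_eq (count : List Int) (bs : List Int) (t : Int) :
    (count.foldl (fun (st : List Int × Int) c => (st.1 ++ [st.2 + c], st.2 + c)) (bs, t)).1
    = bs ++ boundsF t count := by
  induction count generalizing bs t with
  | nil => simp [boundsF]
  | cons c cs ih => simp [List.foldl_cons, ih, boundsF]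

theorem B_rows_eq (buttons : List Int) (count : List Int) (t : Nat)
    (hnn : ∀ c ∈ count, 0 ≤ c) :
    (List.zip ((t : Int) :: boundsF (t : Int) count) (boundsF (t : Int) count)).map
      (fun se => PySem.List.slice buttons (some se.1) (some se.2))
    = specRows buttons t count := by
  induction count generalizing t with
  | nil => simp [boundsF, specRows]
  | cons c cs ih =>
    have hc : 0 ≤ c := hnn c (by simp)
    simp only [boundsF, List.zip_cons_cons, List.map_cons, specRows, List.cons.injEq]
    constructor
    · rw [show (t : Int) + c = (t : Int) + (c.toNat : Int) by omega,
        PySem.List.slice_natCast_add]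
    · rw [show (t : Int) + c = ((t + c.toNat : Nat) : Int) by push_cast; omega]
      exact ih (t + c.toNat) (fun x hx => hnn x (List.mem_cons_of_mem _ hx))

-- ===== VERDICT (by name: the statement is the Claim_ definition above) =====
theorem create_keyboard_layout_spec : Claim_equal_create_keyboard_layout := by
  intro buttons count _ hpre
  obtain ⟨hsum, hnn⟩ := hpre
  have hA := A_fold_eq buttons count [] 0 hnn (by omega)
  have hB := B_bounds_eq count [] 0
  have hR := B_rows_eq buttons count 0 hnn
  simp only [Nat.cast_zero, List.nil_append] at hA hB hR
  unfold Spec_create_keyboard_layout create_keyboard_layout create_keyboard_layout_alt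
  rw [if_neg (by omega), if_neg (by omega), hA, hB, hR]
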